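-- pv_equiv track=rewrite | github.com/edenuis/Python | Code Challenges/bishopAttacks.py | attackPairs
-- ===== SOURCE A (Python) =====
-- def attackPairs(bishops):
--     coord_sum = {}
--     coord_diff = {}
--
--     count = 0
--     for bishop in bishops:
--         sum_coord = bishop[0] + bishop[1]
--         diff_coord = bishop[0] - bishop[1]
--
--         if sum_coord not in coord_sum:
--             coord_sum[sum_coord] = 1
--         else:
--             count += coord_sum[sum_coord]
--             coord_sum[sum_coord] += 1
--
--         if diff_coord not in coord_diff:
--             coord_diff[diff_coord] = 1
--         else:
--             count += coord_diff[diff_coord]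
--             coord_diff[diff_coord] += 1
--     return count
-- ===== SOURCE B (Python) =====
-- def attackPairs(bishops):
--     sums = {}
--     diffs = {}
--     for r, c in bishops:
--         sums[r + c] = sums.get(r + c, 0) + 1
--         diffs[r - c] = diffs.get(r - c, 0) + 1
--     total = 0
--     for k in sums.values():
--         total += k * (k - 1) // 2
--     for k in diffs.values():
--         total += k * (k - 1) // 2
--     return total
-- ===== Notes on version B (the rewrite author's own statement) =====
-- stated objective: simpler
-- what changed: A accumulates a running pair count while it builds the diagonal tables (adding the current multiplicity before each increment); B first builds the two frequency tables in one pass and then sums k*(k-1)//2 over each table's values.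
import Mathlib
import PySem

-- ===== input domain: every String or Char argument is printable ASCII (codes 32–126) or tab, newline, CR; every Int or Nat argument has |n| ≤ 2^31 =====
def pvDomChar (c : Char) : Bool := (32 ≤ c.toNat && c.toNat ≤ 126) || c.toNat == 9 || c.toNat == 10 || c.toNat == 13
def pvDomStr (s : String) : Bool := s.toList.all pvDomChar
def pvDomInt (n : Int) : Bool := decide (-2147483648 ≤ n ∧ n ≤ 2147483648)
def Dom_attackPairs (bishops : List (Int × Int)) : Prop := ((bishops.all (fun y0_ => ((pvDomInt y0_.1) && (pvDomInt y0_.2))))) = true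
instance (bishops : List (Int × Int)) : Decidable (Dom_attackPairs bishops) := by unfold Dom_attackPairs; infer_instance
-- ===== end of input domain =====

-- B replaces A's interleaved running-pair-count with: build the two diagonal frequency tables, then sum k*(k-1)//2 over their values (simpler decomposition, same O(n)).

-- ===== PORT A =====
-- A's loop state: (coord_sum, coord_diff, count); each branch kept in A's order.
def pvAStep (st : (PySem.Dict Int Int) × (PySem.Dict Int Int) × Int) (bishop : Int × Int) :
    (PySem.Dict Int Int) × (PySem.Dict Int Int) × Int :=
  let sumCoord := bishop.1 + bishop.2
  let diffCoord := bishop.1 - bishop.2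
  let cs := st.1
  let cd := st.2.1
  let count := st.2.2
  let p1 : PySem.Dict Int Int × Int :=
    if cs.contains sumCoord = false then (cs.insert sumCoord 1, count)
    else (cs.insert sumCoord (cs.getD sumCoord 0 + 1), count + cs.getD sumCoord 0)
  let p2 : PySem.Dict Int Int × Int :=
    if cd.contains diffCoord = false then (cd.insert diffCoord 1, p1.2)
    else (cd.insert diffCoord (cd.getD diffCoord 0 + 1), p1.2 + cd.getD diffCoord 0)
  (p1.1, p2.1, p2.2)

def attackPairs (bishops : List (Int × Int)) : Int :=
  (bishops.foldl pvAStep (PySem.Dict.empty, PySem.Dict.empty, 0)).2.2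

-- ===== PORT B =====
def attackPairs_alt (bishops : List (Int × Int)) : Int :=
  let sums := bishops.foldl
    (fun d b => d.insert (b.1 + b.2) (d.getD (b.1 + b.2) 0 + 1)) (PySem.Dict.empty : PySem.Dict Int Int)
  let diffs := bishops.foldl
    (fun d b => d.insert (b.1 - b.2) (d.getD (b.1 - b.2) 0 + 1)) (PySem.Dict.empty : PySem.Dict Int Int)
  let t1 := sums.values.foldl (fun t k => t + PySem.Int.floordiv (k * (k - 1)) 2) 0
  diffs.values.foldl (fun t k => t + PySem.Int.floordiv (k * (k - 1)) 2) t1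

-- ===== PRECONDITION & SPEC =====
def Spec_attackPairs (bishops : List (Int × Int)) (out : Int) : Prop := out = attackPairs_alt bishops
instance (bishops : List (Int × Int)) (out : Int) : Decidable (Spec_attackPairs bishops out) := by unfold Spec_attackPairs; infer_instance

-- ===== CLAIM (what is proved, stated in full; the proofs are below) =====
def Claim_equal_attackPairs : Prop := ∀ (bishops : List (Int × Int)), Dom_attackPairs bishops → Spec_attackPairs bishops (attackPairs bishops)

-- ===== LEMMAS AND PROOFS =====

-- tri k = k*(k-1)//2, the value B adds per table entry
def pvTri (v : Int) : Int := PySem.Int.floordiv (v * (v - 1)) 2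

-- pair count of one key stream, as B computes it
def pvPairs (ks : List Int) : Int := ((PySem.Set.ofList ks).map (fun k => pvTri (ks.count k))).sum

theorem pvTri_succ (c : Int) : pvTri (c + 1) = pvTri c + c := by
  unfold pvTri
  rw [PySem.Int.floordiv_eq_ediv_of_pos (by norm_num), PySem.Int.floordiv_eq_ediv_of_pos (by norm_num)]
  have h : (c + 1) * (c + 1 - 1) = c * (c - 1) + c * 2 := by ring
  rw [h, Int.add_mul_ediv_right _ _ (by norm_num : (2:Int) ≠ 0)]

theorem pvSum_map_update (l : List Int) (f g : Int → Int) (x : Int)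
    (hnd : l.Nodup) (hx : x ∈ l) (hfg : ∀ k ∈ l, k ≠ x → f k = g k) :
    (l.map f).sum = (l.map g).sum + (f x - g x) := by
  induction l with
  | nil => cases hx
  | cons a t ih =>
    rcases List.mem_cons.mp hx with h | h
    · subst h
      have : t.map f = t.map g := by
        apply List.map_congr_left
        intro k hk
        exact hfg k (List.mem_cons_of_mem _ hk) (fun he => (List.nodup_cons.mp hnd).1 (he ▸ hk))
      simp [this]; ring
    · have hax : a ≠ x := fun he => (List.nodup_cons.mp hnd).1 (he ▸ h)
      have := ih (List.nodup_cons.mp hnd).2 h (fun k hk => hfg k (List.mem_cons_of_mem _ hk))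
      simp [this, hfg a List.mem_cons_self hax]; ring

theorem pvPairs_snoc (ks : List Int) (x : Int) : pvPairs (ks ++ [x]) = pvPairs ks + (ks.count x : Int) := by
  unfold pvPairs
  rw [PySem.Set.ofList_append_singleton]
  by_cases hx : x ∈ ks
  · rw [PySem.Set.add_of_mem ((PySem.Set.mem_ofList ks x).mpr hx)]
    rw [pvSum_map_update (PySem.Set.ofList ks)
        (fun k => pvTri ((ks ++ [x]).count k)) (fun k => pvTri (ks.count k)) x
        (PySem.Set.nodup_ofList ks) ((PySem.Set.mem_ofList ks x).mpr hx)
        (by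
          intro k _ hk
          simp [List.count_append, Ne.symm hk])]
    have hc : (ks ++ [x]).count x = ks.count x + 1 := by simp [List.count_append]
    rw [hc]
    push_cast
    rw [pvTri_succ]
    ring
  · rw [PySem.Set.add_of_not_mem (fun h => hx ((PySem.Set.mem_ofList ks x).mp h))]
    have hcx : ks.count x = 0 := List.count_eq_zero.mpr hx
    have hmap : (PySem.Set.ofList ks).map (fun k => pvTri ((ks ++ [x]).count k))
        = (PySem.Set.ofList ks).map (fun k => pvTri (ks.count k)) := by
      apply List.map_congr_left
      intro k hk
      have hne : x ≠ k := fun he => hx (he ▸ (PySem.Set.mem_ofList ks k).mp hk)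
      simp [List.count_append, hne]
    have hx1 : (ks ++ [x]).count x = 1 := by simp [List.count_append, hcx]
    rw [List.map_append, List.sum_append, hmap, List.map_singleton, hx1, hcx]
    norm_num [pvTri, PySem.Int.floordiv]

-- the uniform update both of A's branches perform on one dimension's state
theorem pvAStep_eq (cs cd : PySem.Dict Int Int) (cnt : Int) (b : Int × Int) :
    pvAStep (cs, cd, cnt) b
      = (cs.insert (b.1 + b.2) (cs.getD (b.1 + b.2) 0 + 1),
         cd.insert (b.1 - b.2) (cd.getD (b.1 - b.2) 0 + 1),
         cnt + cs.getD (b.1 + b.2) 0 + cd.getD (b.1 - b.2) 0) := by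
  unfold pvAStep
  by_cases h1 : cs.contains (b.1 + b.2) = false <;>
  by_cases h2 : cd.contains (b.1 - b.2) = false <;>
    simp only [h1, h2, Bool.true_eq_false, not_false_eq_true, if_pos, if_neg] <;>
    first
      | (rw [PySem.Dict.getD_of_not_contains cs 0 h1]; try rw [PySem.Dict.getD_of_not_contains cd 0 h2]) <;> norm_num
      | (try rw [PySem.Dict.getD_of_not_contains cd 0 h2]) <;> norm_num

theorem pvCounter_snoc (ks : List Int) (x : Int) :
    PySem.Dict.counter (ks ++ [x]) = (PySem.Dict.counter ks).insert x ((PySem.Dict.counter ks).getD x 0 + 1) := by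
  rw [← PySem.Dict.foldl_insert_getD_add_one_eq_counter, ← PySem.Dict.foldl_insert_getD_add_one_eq_counter,
      List.foldl_append]
  simp

-- main invariant of A's single loop
theorem pvFoldA (bs : List (Int × Int)) :
    bs.foldl pvAStep (PySem.Dict.empty, PySem.Dict.empty, 0)
      = (PySem.Dict.counter (bs.map (fun b => b.1 + b.2)),
         PySem.Dict.counter (bs.map (fun b => b.1 - b.2)),
         pvPairs (bs.map (fun b => b.1 + b.2)) + pvPairs (bs.map (fun b => b.1 - b.2))) := by
  induction bs using List.reverseRecOn with
  | nil => simp [pvPairs]; rfl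
  | append_singleton bs b ih =>
    rw [List.foldl_append, List.foldl_cons, List.foldl_nil, ih, pvAStep_eq]
    simp only [List.map_append, List.map_cons, List.map_nil]
    rw [pvCounter_snoc, pvCounter_snoc, pvPairs_snoc, pvPairs_snoc,
        PySem.Dict.getD_counter, PySem.Dict.getD_counter]
    simp only [Prod.mk.injEq]
    refine ⟨trivial, trivial, ?_⟩
    ring

-- B as pvPairs
theorem pvAltEq (bs : List (Int × Int)) :
    attackPairs_alt bs = pvPairs (bs.map (fun b => b.1 + b.2)) + pvPairs (bs.map (fun b => b.1 - b.2)) := by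
  unfold attackPairs_alt
  have hs : bs.foldl (fun d b => d.insert (b.1 + b.2) (d.getD (b.1 + b.2) 0 + 1))
      (PySem.Dict.empty : PySem.Dict Int Int) = PySem.Dict.counter (bs.map (fun b => b.1 + b.2)) := by
    rw [← PySem.Dict.foldl_insert_getD_add_one_eq_counter, List.foldl_map]
  have hd : bs.foldl (fun d b => d.insert (b.1 - b.2) (d.getD (b.1 - b.2) 0 + 1))
      (PySem.Dict.empty : PySem.Dict Int Int) = PySem.Dict.counter (bs.map (fun b => b.1 - b.2)) := by
    rw [← PySem.Dict.foldl_insert_getD_add_one_eq_counter, List.foldl_map]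
  rw [hs, hd, PySem.List.foldl_add, PySem.List.foldl_add]
  have hv : ∀ ks : List Int,
      ((PySem.Dict.counter ks).values.map (fun k => PySem.Int.floordiv (k * (k - 1)) 2)).sum = pvPairs ks := by
    intro ks
    simp [PySem.Dict.values, PySem.Dict.items_counter, List.map_map, Function.comp_def, pvPairs, pvTri]
  rw [hv, hv]
  ring

-- ===== VERDICT (by name: the statement is the Claim_ definition above) =====
theorem attackPairs_spec : Claim_equal_attackPairs := by
  intro bs _
  unfold Spec_attackPairs attackPairs
  rw [pvFoldA, pvAltEq]
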